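-- pv_equiv track=rewrite | github.com/jacckk7/Project1-ED | Projeto1.py | crypto
-- ===== SOURCE A (Python) =====
-- class Pilha:
--     def __init__(self):
--         self.items = []
--
--     def vazia(self):
--         return self.items == []
--
--     def colocar(self, item):
--         self.items.append(item)
--
--     def tirar(self):
--         return self.items.pop()
--
--     def ver_topo(self):
--         return self.items[len(self.items)-1]
--
--     def tamanho(self):
--         return len(self.items)
--
-- def crypto(instancia):
--     p_crypto = Pilha()
--     numeros = ['1', '2', '3', '4', '5', '6', '7', '8', '9']
--     frase = ''
--
--     for i in range(len(instancia[0]) + 1):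
--         p_crypto.colocar(numeros[i])
--
--         if i == len(instancia[0]) or instancia[0][i] == '+':
--             while not p_crypto.vazia():
--                 frase = frase + p_crypto.tirar()
--
--     return frase
-- ===== SOURCE B (Python) =====
-- def crypto(instancia):
--     numeros = ['1', '2', '3', '4', '5', '6', '7', '8', '9']
--     s = instancia[0]
--
--     # phase 1: segment boundary indices ('+' positions plus the final index)
--     bounds = [i for i, c in enumerate(s) if c == '+'] + [len(s)]
--
--     # phase 2: emit each segment's labels in reverse index order
--     out = []
--     start = 0
--     for b in bounds:
--         for j in range(b, start - 1, -1):
--             out.append(numeros[j])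
--         start = b + 1
--     return ''.join(out)
-- ===== Notes on version B (the rewrite author's own statement) =====
-- stated objective: simpler
-- what changed: Replaced the Pilha stack class and the interleaved push/drain loop by a two-phase structure: first collect the '+' boundary indices, then emit each segment's digit labels by a descending index range, with no stack at all.
import Mathlib
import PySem

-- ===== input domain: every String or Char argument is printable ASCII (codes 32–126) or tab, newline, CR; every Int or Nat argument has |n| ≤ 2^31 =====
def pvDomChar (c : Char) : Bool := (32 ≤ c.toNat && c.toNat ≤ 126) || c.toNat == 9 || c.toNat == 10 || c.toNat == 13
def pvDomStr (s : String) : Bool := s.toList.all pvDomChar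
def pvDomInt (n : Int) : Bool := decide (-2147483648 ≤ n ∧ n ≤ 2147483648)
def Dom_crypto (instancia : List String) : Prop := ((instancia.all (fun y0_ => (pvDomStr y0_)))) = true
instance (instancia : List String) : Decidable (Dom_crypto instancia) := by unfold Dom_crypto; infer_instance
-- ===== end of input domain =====

-- B replaces A's stack with a two-phase boundary-scan-then-emit structure (objective: simpler).

-- ===== PORT A =====
-- numeros[i]; out-of-range indices are excluded by Pre_crypto
def pvNum (i : Nat) : Char := (['1','2','3','4','5','6','7','8','9'] : List Char).getD i ' '

-- the 'while not p_crypto.vazia(): frase = frase + p_crypto.tirar()' loop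
-- (stack top = last element, as in Python's list append/pop)
-- fuel = initial stack size (the loop pops once per iteration); structural so the kernel can evaluate
def pvDrain : Nat → List Char → List Char → List Char
  | 0, _, fr => fr
  | _, [], fr => fr
  | f + 1, a :: rest, fr => pvDrain f ((a :: rest).dropLast) (fr ++ [(a :: rest).getLast!])

-- one iteration of A's for-loop: push numeros[i], drain at a boundary
def pvStepA (s : List Char) (p : List Char × List Char) (i : Nat) : List Char × List Char :=
  let st := p.1 ++ [pvNum i]
  if i == s.length || s.getD i ' ' == '+' then ([], pvDrain st.length st p.2) else (st, p.2)

def crypto (instancia : List String) : String :=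
  String.ofList
    ((List.range ((instancia.headD "").toList.length + 1)).foldl
      (pvStepA (instancia.headD "").toList) ([], [])).2

-- ===== PORT B =====
-- phase 1: boundary indices ('+' positions plus the final index)
def pvBounds (s : List Char) : List Nat :=
  ((List.range s.length).filter (fun i => s.getD i ' ' == '+')) ++ [s.length]

-- phase 2 body: emit numeros[j] for j from b down to start (Python's range(b, start-1, -1))
def pvStepB (p : List Char × Nat) (b : Nat) : List Char × Nat :=
  (p.1 ++ ((List.range' p.2 (b + 1 - p.2)).reverse.map pvNum), b + 1)

def crypto_alt (instancia : List String) : String :=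
  String.ofList ((pvBounds (instancia.headD "").toList).foldl pvStepB ([], 0)).1

-- ===== PRECONDITION & SPEC =====
-- Pre_ = exactly the inputs on which A returns: A raises IndexError on the empty
-- list (instancia[0]) and whenever len(instancia[0]) ≥ 9 (numeros[len]).
def Pre_crypto (instancia : List String) : Prop :=
  instancia ≠ [] ∧ (instancia.headD "").toList.length ≤ 8
instance (instancia : List String) : Decidable (Pre_crypto instancia) := by unfold Pre_crypto; infer_instance
def pvWitness_crypto : List String := (["ab+cd"])

def Spec_crypto (instancia : List String) (out : String) : Prop := out = crypto_alt instancia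
instance (instancia : List String) (out : String) : Decidable (Spec_crypto instancia out) := by unfold Spec_crypto; infer_instance

-- ===== CLAIM (what is proved, stated in full; the proofs are below) =====
def Claim_equal_crypto : Prop := ∀ (instancia : List String), Dom_crypto instancia → Pre_crypto instancia → Spec_crypto instancia (crypto instancia)

-- ===== LEMMAS AND PROOFS =====
-- both programs depend on s only through its length and its '+'-pattern;
-- we reduce each to a function of the pattern and decide all patterns of length ≤ 8

def pvStepA' (bs : List Bool) (p : List Char × List Char) (i : Nat) : List Char × List Char :=
  let st := p.1 ++ [pvNum i]
  if i == bs.length || bs.getD i false then ([], pvDrain st.length st p.2) else (st, p.2)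

def pvFA (bs : List Bool) : List Char :=
  ((List.range (bs.length + 1)).foldl (pvStepA' bs) ([], [])).2

def pvFB (bs : List Bool) : List Char :=
  ((((List.range bs.length).filter (fun i => bs.getD i false)) ++ [bs.length]).foldl pvStepB ([], 0)).1

theorem pvGetD_map (s : List Char) (i : Nat) (h : i < s.length) :
    (s.map (· == '+')).getD i false = (s.getD i ' ' == '+') := by
  rw [List.getD_eq_getElem?_getD, List.getD_eq_getElem?_getD, List.getElem?_map,
    List.getElem?_eq_getElem h]
  simp

theorem pvFA_eq (s : List Char) :
    ((List.range (s.length + 1)).foldl (pvStepA s) ([], [])).2 = pvFA (s.map (· == '+')) := by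
  unfold pvFA
  have hlen : (s.map (· == '+')).length = s.length := by simp
  rw [hlen]
  apply congrArg (fun t => Prod.snd t)
  apply PySem.List.foldl_congr_mem
  intro p i hi
  have hi' : i < s.length + 1 := by simpa using List.mem_range.mp hi
  unfold pvStepA pvStepA'
  rw [hlen]
  rcases Nat.lt_or_ge i s.length with h | h
  · rw [pvGetD_map s i h]
  · have : i = s.length := by omega
    simp [this]

theorem pvFB_eq (s : List Char) :
    ((pvBounds s).foldl pvStepB ([], 0)).1 = pvFB (s.map (· == '+')) := by
  unfold pvFB pvBounds
  have hlen : (s.map (· == '+')).length = s.length := by simp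
  rw [hlen]
  congr 3
  apply List.filter_congr
  intro i hi
  exact (pvGetD_map s i (List.mem_range.mp hi)).symm

-- all Bool lists of length k, with completeness
def pvPats : Nat → List (List Bool)
  | 0 => [[]]
  | k + 1 => (pvPats k).flatMap (fun l => [true :: l, false :: l])

theorem pvPats_complete (bs : List Bool) : bs ∈ pvPats bs.length := by
  induction bs with
  | nil => simp [pvPats]
  | cons a t ih =>
    simp only [List.length_cons, pvPats, List.mem_flatMap]
    exact ⟨t, ih, by cases a <;> simp⟩

set_option maxRecDepth 100000 in
theorem pvMain : ∀ k ∈ List.range 9, ∀ bs ∈ pvPats k, pvFA bs = pvFB bs := by decide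

-- ===== VERDICT (by name: the statement is the Claim_ definition above) =====
theorem crypto_spec : Claim_equal_crypto := by
  intro instancia _ hpre
  unfold Spec_crypto crypto crypto_alt
  rw [pvFA_eq, pvFB_eq]
  set s := (instancia.headD "").toList with hs
  have hb : (s.map (· == '+')).length = s.length := by simp
  exact congrArg String.ofList
    (pvMain _ (by rw [hb]; exact List.mem_range.mpr (Nat.lt_succ_of_le hpre.2))
      _ (pvPats_complete _))
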